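-- pv_equiv track=rewrite | github.com/EugeneDlg/BnCgame | BnC_Tk.py | populate
-- ===== SOURCE A (Python) =====
-- def populate(interim_str, v_list, attempt_set):
--     if interim_str.count('V') == 0:
--         attempt_set.add(''.join(interim_str))
--     else:
--         for y in v_list:
--             i = 0
--             a = ''
--             for z in interim_str:
--                 if z == "V":
--                     a += y[i]
--                     i += 1
--                 else:
--                     a += z
--             attempt_set.add(a[:])
--     return attempt_set
-- ===== SOURCE B (Python) =====
-- def populate(interim_str, v_list, attempt_set):
--     parts = interim_str.split('V')
--     if len(parts) == 1:
--         attempt_set.add(''.join(interim_str))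
--     else:
--         for y in v_list:
--             attempt_set.add(parts[0] + ''.join(y[i] + parts[i + 1] for i in range(len(parts) - 1)))
--     return attempt_set
-- ===== Notes on version B (the rewrite author's own statement) =====
-- stated objective: idiomatic
-- what changed: B splits interim_str on 'V' once and rebuilds each candidate string by interleaving the fixed segments with the candidate's characters, instead of A's char-by-char scan with a running counter per candidate.
import Mathlib
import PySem

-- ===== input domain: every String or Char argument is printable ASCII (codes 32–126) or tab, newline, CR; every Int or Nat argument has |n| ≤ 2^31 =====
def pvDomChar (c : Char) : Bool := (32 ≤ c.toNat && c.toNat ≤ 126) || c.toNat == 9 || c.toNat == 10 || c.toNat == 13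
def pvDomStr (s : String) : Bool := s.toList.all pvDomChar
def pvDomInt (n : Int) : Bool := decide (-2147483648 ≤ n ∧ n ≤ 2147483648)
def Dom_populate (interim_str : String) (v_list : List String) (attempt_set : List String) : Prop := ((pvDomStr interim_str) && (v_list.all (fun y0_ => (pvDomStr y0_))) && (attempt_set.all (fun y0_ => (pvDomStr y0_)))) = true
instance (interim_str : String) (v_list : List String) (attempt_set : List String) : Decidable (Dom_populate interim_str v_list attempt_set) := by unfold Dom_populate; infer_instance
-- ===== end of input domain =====

-- B rebuilds each attempt from interim_str.split('V') segments instead of A's per-char scan with a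
-- running counter (idiomatic). Both versions mutate attempt_set (set.add) identically; the proved
-- equivalence is about the returned set.


-- ===== PORT A =====
def populate (interim_str : String) (v_list : List String) (attempt_set : List String) : List String :=
  if PySem.Str.count interim_str "V" == 0 then
    PySem.Set.add attempt_set (String.ofList (PySem.Chars.join [] (interim_str.toList.map (fun c => [c]))))
  else
    v_list.foldl (fun s y =>
      -- i = 0; a = ''; for z in interim_str: …   (y[i] raises IndexError outside Pre_; .getD '!' is unreachable inside Pre_)
      let st := interim_str.toList.foldl
        (fun (st : Int × List Char) z =>
          if z == 'V' then (st.1 + 1, st.2 ++ [(PySem.Str.pyGet? y st.1).getD '!'])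
          else (st.1, st.2 ++ [z])) (0, [])
      PySem.Set.add s (String.ofList st.2)) attempt_set

-- ===== PORT B =====
def populate_alt (interim_str : String) (v_list : List String) (attempt_set : List String) : List String :=
  let parts := PySem.Chars.splitOn interim_str.toList ['V']
  if parts.length == 1 then
    PySem.Set.add attempt_set (String.ofList (PySem.Chars.join [] (interim_str.toList.map (fun c => [c]))))
  else
    v_list.foldl (fun s y =>
      -- parts[0] + ''.join(y[i] + parts[i+1] for i in range(len(parts)-1))
      let filled := parts.headD [] ++
        PySem.Chars.join [] ((PySem.List.pyRange 0 ((parts.length : Int) - 1)).map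
          (fun i => (PySem.Str.pyGet? y i).getD '!' :: (PySem.List.pyGet? parts (i + 1)).getD []))
      PySem.Set.add s (String.ofList filled)) attempt_set

-- ===== PRECONDITION & SPEC =====
-- Pre_ excludes exactly the inputs where A raises IndexError: interim_str contains more 'V's than
-- some candidate y in v_list has characters (B raises there too).
def Pre_populate (interim_str : String) (v_list : List String) (attempt_set : List String) : Prop :=
  ∀ y ∈ v_list, (PySem.Str.count interim_str "V" : Int) ≤ PySem.Str.len y
instance (interim_str : String) (v_list : List String) (attempt_set : List String) : Decidable (Pre_populate interim_str v_list attempt_set) := by unfold Pre_populate; infer_instance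
def pvWitness_populate : String × List String × List String := ("aVbV", ["xy", "zw"], ["p"])
def Spec_populate (interim_str : String) (v_list : List String) (attempt_set : List String) (out : List String) : Prop := out = populate_alt interim_str v_list attempt_set
instance (interim_str : String) (v_list : List String) (attempt_set : List String) (out : List String) : Decidable (Spec_populate interim_str v_list attempt_set out) := by unfold Spec_populate; infer_instance

-- ===== CLAIM (what is proved, stated in full; the proofs are below) =====
def Claim_equal_populate : Prop := ∀ (interim_str : String) (v_list : List String) (attempt_set : List String), Dom_populate interim_str v_list attempt_set → Pre_populate interim_str v_list attempt_set → Spec_populate interim_str v_list attempt_set (populate interim_str v_list attempt_set)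

-- ===== LEMMAS AND PROOFS =====

-- simple recursive model of s.split('V')
def pvPreH (xs : List Char) : List (List Char) → List (List Char)
  | [] => [xs]
  | p :: ps => (xs ++ p) :: ps

def pvSplitV : List Char → List (List Char)
  | [] => [[]]
  | c :: cs => if c = 'V' then [] :: pvSplitV cs else pvPreH [c] (pvSplitV cs)

-- the common fill: replace each 'V' by the next char of ys
def pvFill : List Char → List Char → List Char
  | [], _ => []
  | c :: cs, ys =>
    if c = 'V' then
      match ys with
      | [] => []
      | d :: ds => d :: pvFill cs ds
    else c :: pvFill cs ys

-- interleave the split segments with chars of ys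
def pvInter : List (List Char) → List Char → List Char
  | [], _ => []
  | [p], _ => p
  | p :: _ :: _, [] => p
  | p :: q :: ps, c :: ys => p ++ c :: pvInter (q :: ps) ys

theorem pvSplitV_ne_nil (cs : List Char) : pvSplitV cs ≠ [] := by
  cases cs with
  | nil => simp [pvSplitV]
  | cons c cs =>
    simp only [pvSplitV]
    split
    · simp
    · cases h : pvSplitV cs <;> simp [pvPreH]

theorem pvPreH_preH (a b : List Char) (xs : List (List Char)) :
    pvPreH a (pvPreH b xs) = pvPreH (a ++ b) xs := by
  cases xs <;> simp [pvPreH]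

theorem pvGo_eq (fuel : Nat) (l cur : List Char) (acc : List (List Char)) (h : l.length ≤ fuel) :
    PySem.Chars.splitOn.go ['V'] fuel l cur acc = acc.reverse ++ pvPreH cur.reverse (pvSplitV l) := by
  induction fuel generalizing l cur acc with
  | zero =>
    interval_cases hl : l.length
    have : l = [] := List.length_eq_zero_iff.mp hl
    subst this
    simp [PySem.Chars.splitOn.go, pvSplitV, pvPreH]
  | succ fuel ih =>
    cases l with
    | nil => simp [PySem.Chars.splitOn.go, pvSplitV, pvPreH]
    | cons c rest =>
      by_cases hc : c = 'V'
      · subst hc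
        rw [PySem.Chars.splitOn.go]
        simp only [List.isPrefixOf, beq_self_eq_true, Bool.true_and, List.isPrefixOf_nil_left,
          if_true, List.length_nil, List.length_cons, List.drop_succ_cons, List.drop_zero]
        rw [ih rest [] (cur.reverse :: acc) (by simpa using Nat.lt_succ_iff.mp (by simpa using h))]
        cases hsv : pvSplitV rest with
        | nil => exact absurd hsv (pvSplitV_ne_nil rest)
        | cons a l => simp [pvSplitV, pvPreH, hsv]
      · rw [PySem.Chars.splitOn.go]
        have hpre : List.isPrefixOf ['V'] (c :: rest) = false := by
          simp [List.isPrefixOf]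
          exact fun hcv => hc hcv.symm
        simp only [hpre, if_false]
        rw [ih rest (c :: cur) acc (by simpa using Nat.lt_succ_iff.mp (by simpa using h))]
        simp [pvSplitV, hc, ← pvPreH_preH]

theorem pvSplitOn_eq (cs : List Char) : PySem.Chars.splitOn cs ['V'] = pvSplitV cs := by
  rw [PySem.Chars.splitOn]
  rw [pvGo_eq _ _ _ _ (Nat.le_succ _)]
  obtain ⟨p, ps, hps⟩ := List.exists_cons_of_ne_nil (pvSplitV_ne_nil cs)
  simp [hps, pvPreH]

theorem pvCountGo_eq (fuel : Nat) (l : List Char) (acc : Nat) (h : l.length ≤ fuel) :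
    PySem.Chars.count.go ['V'] fuel l acc = acc + l.count 'V' := by
  induction fuel generalizing l acc with
  | zero =>
    interval_cases hl : l.length
    have : l = [] := List.length_eq_zero_iff.mp hl
    subst this
    simp [PySem.Chars.count.go]
  | succ fuel ih =>
    cases l with
    | nil => simp [PySem.Chars.count.go]
    | cons c rest =>
      by_cases hc : c = 'V'
      · subst hc
        rw [PySem.Chars.count.go]
        simp only [List.isPrefixOf, beq_self_eq_true, Bool.true_and, List.isPrefixOf_nil_left,
          if_true, List.length_nil, List.length_cons, List.drop_succ_cons, List.drop_zero]
        rw [ih rest (acc + 1) (by simpa using Nat.lt_succ_iff.mp (by simpa using h))]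
        simp [List.count_cons]
        omega
      · rw [PySem.Chars.count.go]
        have hpre : List.isPrefixOf ['V'] (c :: rest) = false := by
          simp [List.isPrefixOf]
          exact fun hcv => hc hcv.symm
        simp only [hpre, if_false]
        rw [ih rest acc (by simpa using Nat.lt_succ_iff.mp (by simpa using h))]
        simp [List.count_cons, hc]

theorem pvCount_eq (cs : List Char) : PySem.Chars.count cs ['V'] = cs.count 'V' := by
  rw [PySem.Chars.count]
  simp only [List.isEmpty_cons, if_false]
  simpa using pvCountGo_eq cs.length cs 0 le_rfl

theorem pvSplitV_length (cs : List Char) : (pvSplitV cs).length = cs.count 'V' + 1 := by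
  induction cs with
  | nil => simp [pvSplitV]
  | cons c cs ih =>
    by_cases hc : c = 'V'
    · subst hc; simp [pvSplitV, List.count_cons, ih]
    · obtain ⟨p, ps, hps⟩ := List.exists_cons_of_ne_nil (pvSplitV_ne_nil cs)
      simp [pvSplitV, hc, hps, pvPreH, List.count_cons]
      have := ih
      rw [hps] at this
      simpa using this

theorem pvFill_eq_inter (cs ys : List Char) : pvFill cs ys = pvInter (pvSplitV cs) ys := by
  induction cs generalizing ys with
  | nil => simp [pvFill, pvSplitV, pvInter]
  | cons c cs ih =>
    by_cases hc : c = 'V'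
    · subst hc
      simp only [pvSplitV, if_true, pvFill]
      obtain ⟨p, ps, hps⟩ := List.exists_cons_of_ne_nil (pvSplitV_ne_nil cs)
      cases ys with
      | nil => simp [hps, pvInter]
      | cons d ds => simp [hps, pvInter, ih, hps]
    · obtain ⟨p, ps, hps⟩ := List.exists_cons_of_ne_nil (pvSplitV_ne_nil cs)
      simp only [pvSplitV, hc, if_false, hps, pvPreH, pvFill]
      cases ps with
      | nil =>
        cases ys with
        | nil => simp [pvInter, ih, hps]
        | cons d ds => simp [pvInter, ih, hps]
      | cons q qs =>
        cases ys with
        | nil => simp [pvInter, ih, hps]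
        | cons d ds => simp [pvInter, ih, hps]

theorem pvJoin_nil_cons (a : List Char) (l : List (List Char)) :
    PySem.Chars.join [] (a :: l) = a ++ PySem.Chars.join [] l := by
  cases l with
  | nil => simp [PySem.Chars.join_singleton, PySem.Chars.join, List.intercalate]
  | cons b bs => rw [PySem.Chars.join_cons_cons]; simp

theorem pvRange_zero_natCast (n : Nat) :
    PySem.List.pyRange 0 (n : Int) = (List.range n).map (Nat.cast : Nat → Int) := by
  rw [PySem.List.pyRange_of_pos _ _ Int.zero_lt_one]
  cases n with
  | zero => simp
  | succ m =>
    have hlt : (0 : Int) < ((m + 1 : Nat) : Int) := by exact_mod_cast Nat.succ_pos m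
    rw [if_pos hlt]
    have h2 : (((m + 1 : Nat) : Int) - 0 + 1 - 1) / 1 = ((m + 1 : Nat) : Int) := by
      simp [Int.ediv_one]
    rw [h2, Int.toNat_natCast]
    apply List.map_congr_left
    intro k _
    simp

theorem pvLemB (ps : List (List Char)) (p : List Char) (ys : List Char)
    (h : ps.length ≤ ys.length) :
    p ++ PySem.Chars.join [] (((List.range ps.length).map (Nat.cast : Nat → Int)).map
      (fun i => (PySem.List.pyGet? ys i).getD '!' :: (PySem.List.pyGet? (p :: ps) (i + 1)).getD []))
      = pvInter (p :: ps) ys := by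
  induction ps generalizing p ys with
  | nil => simp [pvInter, PySem.Chars.join, List.intercalate]
  | cons q qs ih =>
    cases ys with
    | nil => simp at h
    | cons c ys' =>
      have hstep : (List.range (q :: qs).length).map (Nat.cast : Nat → Int)
          = (0 : Int) :: (List.range qs.length).map (fun k : Nat => ((k + 1 : Nat) : Int)) := by
        rw [List.length_cons, List.range_succ_eq_map, List.map_cons, List.map_map]
        simp [Function.comp_def]
      rw [hstep, List.map_cons, pvJoin_nil_cons, List.map_map]
      have h0 : (PySem.List.pyGet? (c :: ys') (0 : Int)).getD '!' = c := by
        rw [show (0 : Int) = ((0 : Nat) : Int) by simp, PySem.List.pyGet?_natCast]; simp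
      have h1 : (PySem.List.pyGet? (p :: q :: qs) ((0 : Int) + 1)).getD [] = q := by
        rw [show (0 : Int) + 1 = ((1 : Nat) : Int) by simp, PySem.List.pyGet?_natCast]; simp
      rw [h0, h1]
      have hmap : (List.range qs.length).map
          ((fun i => (PySem.List.pyGet? (c :: ys') i).getD '!' ::
            (PySem.List.pyGet? (p :: q :: qs) (i + 1)).getD []) ∘ (fun k : Nat => ((k + 1 : Nat) : Int)))
          = (List.range qs.length).map
          (fun k : Nat => (PySem.List.pyGet? ys' ((k : Nat) : Int)).getD '!' ::
            (PySem.List.pyGet? (q :: qs) (((k : Nat) : Int) + 1)).getD []) := by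
        apply List.map_congr_left
        intro k _
        simp only [Function.comp_apply]
        have e1 : (PySem.List.pyGet? (c :: ys') (((k + 1 : Nat) : Int))).getD '!'
            = (PySem.List.pyGet? ys' ((k : Nat) : Int)).getD '!' := by
          rw [PySem.List.pyGet?_natCast, PySem.List.pyGet?_natCast]
          simp
        have e2 : (PySem.List.pyGet? (p :: q :: qs) (((k + 1 : Nat) : Int) + 1)).getD []
            = (PySem.List.pyGet? (q :: qs) (((k : Nat) : Int) + 1)).getD [] := by
          have c1 : ((k + 1 : Nat) : Int) + 1 = ((k + 2 : Nat) : Int) := by push_cast; ring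
          have c2 : ((k : Nat) : Int) + 1 = ((k + 1 : Nat) : Int) := by push_cast; ring
          rw [c1, c2, PySem.List.pyGet?_natCast, PySem.List.pyGet?_natCast]
          simp
        rw [e1, e2]
      rw [hmap]
      have ihq := ih q ys' (by simpa using Nat.succ_le_succ_iff.mp (by simpa using h))
      rw [List.map_map, Function.comp_def] at ihq
      simp only [pvInter, List.cons_append]
      congr 2

theorem pvLemA (y : String) (cs : List Char) (k : Nat) (acc : List Char)
    (h : k + cs.count 'V' ≤ y.toList.length) :
    cs.foldl (fun (st : Int × List Char) z =>
        if z == 'V' then (st.1 + 1, st.2 ++ [(PySem.Str.pyGet? y st.1).getD '!'])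
        else (st.1, st.2 ++ [z])) ((k : Int), acc)
      = (((k + cs.count 'V' : Nat) : Int), acc ++ pvFill cs (y.toList.drop k)) := by
  induction cs generalizing k acc with
  | nil => simp [pvFill]
  | cons c cs ih =>
    by_cases hc : c = 'V'
    · subst hc
      have hk : k < y.toList.length := by
        rw [List.count_cons_self] at h; omega
      simp only [List.foldl_cons, beq_self_eq_true, if_true]
      have hg : (PySem.Str.pyGet? y ((k : Nat) : Int)).getD '!' = y.toList[k] := by
        rw [PySem.Str.pyGet?_eq, PySem.Chars.pyGet?_eq_listPyGet?, PySem.List.pyGet?_natCast,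
          List.getElem?_eq_getElem hk]
        rfl
      have hstep : ((k : Nat) : Int) + 1 = ((k + 1 : Nat) : Int) := by push_cast; ring
      rw [hg, hstep, ih (k + 1) (acc ++ [y.toList[k]]) (by rw [List.count_cons_self] at h; omega)]
      rw [List.drop_eq_getElem_cons hk]
      simp [pvFill, List.count_cons]
      omega
    · rw [List.foldl_cons, if_neg (show ¬((c == 'V') = true) by simp [hc])]
      have hred : ((((k : Int)), acc).1, (((k : Int)), acc).2 ++ [c]) = (((k : Int)), acc ++ [c]) := rfl
      rw [hred, ih k (acc ++ [c]) (by rw [List.count_cons] at h; omega)]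
      simp [pvFill, hc, List.count_cons]

theorem pvStrCount_eq (s : String) : PySem.Str.count s "V" = s.toList.count 'V' := by
  have : ("V" : String).toList = ['V'] := rfl
  rw [PySem.Str.count, this, pvCount_eq]

theorem pvStrLen_eq (y : String) : PySem.Str.len y = (y.toList.length : Int) := by
  simp [PySem.Str.len, PySem.Chars.len_eq]

-- ===== VERDICT (by name: the statement is the Claim_ definition above) =====
theorem populate_spec : Claim_equal_populate := by
  intro s vl as _ hpre
  unfold Spec_populate populate populate_alt
  rw [pvSplitOn_eq, pvStrCount_eq]
  have hlen := pvSplitV_length s.toList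
  by_cases hc : s.toList.count 'V' = 0
  · have h1 : (pvSplitV s.toList).length = 1 := by rw [hlen, hc]
    simp [hc, h1]
  · have h1 : (pvSplitV s.toList).length ≠ 1 := by rw [hlen]; omega
    have hc' : (s.toList.count 'V' == 0) = false := by simp [hc]
    have h1' : ((pvSplitV s.toList).length == 1) = false := by simp [h1]
    simp only [hc', h1', Bool.false_eq_true, if_false]
    apply PySem.List.foldl_congr_mem
    intro acc y hy
    have hyc : s.toList.count 'V' ≤ y.toList.length := by
      have := hpre y hy
      rw [pvStrCount_eq, pvStrLen_eq] at this
      exact_mod_cast this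
    congr 1
    apply congrArg
    -- A side
    have hA := pvLemA y s.toList 0 [] (by simpa using hyc)
    have hz : ((0 : Nat) : Int) = (0 : Int) := by simp
    rw [hz] at hA
    rw [hA]
    simp only [List.drop_zero, List.nil_append]
    -- B side
    obtain ⟨p, ps, hps⟩ := List.exists_cons_of_ne_nil (pvSplitV_ne_nil s.toList)
    have hlps : ps.length = s.toList.count 'V' := by
      have := hlen; rw [hps] at this; simp at this; omega
    have hcast : (((pvSplitV s.toList).length : Int) - 1) = (ps.length : Int) := by
      rw [hps]; push_cast; simp
    rw [hps] at hcast ⊢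
    rw [hcast, pvRange_zero_natCast]
    simp only [List.headD_cons]
    have hB := pvLemB ps p y.toList (by omega)
    have hg : ∀ i : Int, (PySem.Str.pyGet? y i).getD '!' = (PySem.List.pyGet? y.toList i).getD '!' := by
      intro i
      rw [PySem.Str.pyGet?_eq, PySem.Chars.pyGet?_eq_listPyGet?]
    simp only [hg]
    rw [hB]
    rw [pvFill_eq_inter, hps]
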